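-- pv_equiv track=rewrite | github.com/duttosourav8/Optimized-Tirgn | src/history_validity_calibration.py | build_so_history
-- ===== SOURCE A (Python) =====
-- from collections import defaultdict
-- from typing import Dict, List, Tuple
-- from collections import defaultdict
-- from typing import Dict, List, Tuple
--
-- Triple = Tuple[int, int, int, int]
--
-- def build_so_history(triples: List[Triple]):
--     so_hist = defaultdict(lambda: defaultdict(list))
--     for s, r, o, t in triples:
--         so_hist[s][o].append(t)
--     for s in so_hist:
--         for o in so_hist[s]:
--             so_hist[s][o].sort()
--     return so_hist
-- ===== SOURCE B (Python) =====
-- def build_so_history(triples):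
--     # Pure nested comprehension: ordered distinct subjects, then ordered distinct
--     # objects per subject, then the sorted timestamps of each (s, o) group.
--     subjects = list(dict.fromkeys(s for s, _, _, _ in triples))
--     return {
--         s: {
--             o: sorted(t for s2, _, o2, t in triples if s2 == s and o2 == o)
--             for o in dict.fromkeys(o2 for s2, _, o2, _ in triples if s2 == s)
--         }
--         for s in subjects
--     }
-- ===== Notes on version B (the rewrite author's own statement) =====
-- stated objective: alternative
-- what changed: Replaces the mutable nested defaultdict build plus per-bucket in-place sorts with a pure nested comprehension over the ordered-deduplicated subjects and objects, sorting each filtered timestamp group directly (returns plain dicts, which compare equal to A's defaultdicts).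
import Mathlib
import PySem

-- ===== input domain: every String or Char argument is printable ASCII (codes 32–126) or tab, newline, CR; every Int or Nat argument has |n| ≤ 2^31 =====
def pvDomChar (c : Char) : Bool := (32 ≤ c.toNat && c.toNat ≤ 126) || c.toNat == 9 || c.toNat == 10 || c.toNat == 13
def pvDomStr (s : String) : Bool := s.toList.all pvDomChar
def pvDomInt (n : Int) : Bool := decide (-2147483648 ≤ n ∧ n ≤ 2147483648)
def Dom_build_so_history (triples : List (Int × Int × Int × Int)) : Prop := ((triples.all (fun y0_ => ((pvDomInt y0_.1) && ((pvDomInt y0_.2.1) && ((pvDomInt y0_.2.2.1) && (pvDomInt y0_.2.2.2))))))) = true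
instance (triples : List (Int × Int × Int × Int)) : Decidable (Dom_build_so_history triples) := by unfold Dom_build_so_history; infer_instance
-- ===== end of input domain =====

-- B is an alternative, structurally different implementation: a pure nested comprehension
-- over deduplicated keys instead of A's mutable nested-defaultdict build with in-place sorts.

-- ===== PORT A =====
-- Nested defaultdict: for s,r,o,t in triples: so_hist[s][o].append(t);
-- then the in-place `so_hist[s][o].sort()` loop over every existing key = mapping `sorted`
-- over every stored list (keys and insertion order unchanged) — exact.
def build_so_history (triples : List (Int × Int × Int × Int)) : List (Int × List (Int × List Int)) :=
  ((triples.foldl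
      (fun d p => d.modify p.1 PySem.Dict.empty
        (fun inner => inner.modify p.2.2.1 [] (fun ts => ts ++ [p.2.2.2])))
      (PySem.Dict.empty : PySem.Dict Int (PySem.Dict Int (List Int)))).items).map (fun si =>
    (si.1, si.2.items.map (fun ot => (ot.1, PySem.List.sorted ot.2 (fun x => x) false))))

-- ===== PORT B =====
def build_so_history_alt (triples : List (Int × Int × Int × Int)) : List (Int × List (Int × List Int)) :=
  (PySem.List.dedup (triples.map (fun p => p.1))).map (fun s =>
    (s, (PySem.List.dedup ((triples.filter (fun p => p.1 == s)).map (fun p => p.2.2.1))).map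
      (fun o =>
        (o, PySem.List.sorted
              ((triples.filter (fun p => p.1 == s && p.2.2.1 == o)).map (fun p => p.2.2.2))
              (fun x => x) false))))

-- ===== PRECONDITION & SPEC =====
def Spec_build_so_history (triples : List (Int × Int × Int × Int)) (out : List (Int × List (Int × List Int))) : Prop := out = build_so_history_alt triples
instance (triples : List (Int × Int × Int × Int)) (out : List (Int × List (Int × List Int))) : Decidable (Spec_build_so_history triples out) := by unfold Spec_build_so_history; infer_instance

-- ===== CLAIM (what is proved, stated in full; the proofs are below) =====
def Claim_equal_build_so_history : Prop := ∀ (triples : List (Int × Int × Int × Int)), Dom_build_so_history triples → Spec_build_so_history triples (build_so_history triples)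

-- ===== LEMMAS AND PROOFS =====

-- getD of a modify-loop keyed through `k` = the fold of exactly the updates whose key hit `c`.
theorem getD_foldl_modify_key {α ν : Type} (l : List α) (k : α → Int) (d0 : ν)
    (g : α → ν → ν) (d : PySem.Dict Int ν) (c : Int) :
    (l.foldl (fun d x => d.modify (k x) d0 (g x)) d).getD c d0
      = (l.filter (fun x => k x == c)).foldl (fun v x => g x v) (d.getD c d0) := by
  induction l generalizing d with
  | nil => rfl
  | cons a l ih =>
    simp only [List.foldl_cons, List.filter_cons]
    by_cases h : k a = c
    · simp [h, ih]
    · have hb : (k a == c) = false := by simp [h]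
      simp [hb, ih, PySem.Dict.getD_modify, Ne.symm h]

theorem build_so_history_spec : Claim_equal_build_so_history := by
  intro triples _
  unfold Spec_build_so_history build_so_history build_so_history_alt
  have hnd : (triples.foldl
      (fun d p => d.modify p.1 PySem.Dict.empty
        (fun inner => inner.modify p.2.2.1 [] (fun ts => ts ++ [p.2.2.2])))
      PySem.Dict.empty).keys.Nodup :=
    PySem.Dict.nodup_keys_foldl_modify_key _ _ _ _ _ PySem.Dict.nodup_keys_empty
  rw [PySem.Dict.items_eq_map_keys _ hnd PySem.Dict.empty,
      PySem.Dict.keys_foldl_modify_key]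
  simp only [List.map_map]
  have hkeys : PySem.Set.update (PySem.Dict.empty (κ := Int) (ν := PySem.Dict Int (List Int))).keys
      (triples.map (fun p => p.1)) = PySem.List.dedup (triples.map (fun p => p.1)) := by
    simp [PySem.List.dedup_eq_ofList, PySem.Set.ofList_eq_foldl, PySem.Set.update,
      PySem.Dict.keys_empty]
  rw [hkeys]
  apply List.map_congr_left
  intro s _
  simp only [Function.comp]
  -- outer value at s
  rw [getD_foldl_modify_key triples (fun p => p.1) PySem.Dict.empty
        (fun p inner => inner.modify p.2.2.1 [] (fun ts => ts ++ [p.2.2.2]))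
        PySem.Dict.empty s]
  rw [PySem.Dict.getD_empty]
  have hnd2 : ((triples.filter (fun p => p.1 == s)).foldl
      (fun inner p => inner.modify p.2.2.1 [] (fun ts => ts ++ [p.2.2.2]))
      PySem.Dict.empty).keys.Nodup :=
    PySem.Dict.nodup_keys_foldl_modify_key _ _ _ _ _ PySem.Dict.nodup_keys_empty
  rw [PySem.Dict.items_eq_map_keys _ hnd2 ([] : List Int),
      PySem.Dict.keys_foldl_modify_key]
  have hkeys2 : PySem.Set.update (PySem.Dict.empty (κ := Int) (ν := List Int)).keys
      ((triples.filter (fun p => p.1 == s)).map (fun p => p.2.2.1))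
      = PySem.List.dedup ((triples.filter (fun p => p.1 == s)).map (fun p => p.2.2.1)) := by
    simp [PySem.List.dedup_eq_ofList, PySem.Set.ofList_eq_foldl, PySem.Set.update,
      PySem.Dict.keys_empty]
  rw [hkeys2]
  simp only [List.map_map]
  refine congrArg _ (List.map_congr_left ?_)
  intro o _
  simp only [Function.comp]
  rw [getD_foldl_modify_key (triples.filter (fun p => p.1 == s)) (fun p => p.2.2.1) []
        (fun p ts => ts ++ [p.2.2.2]) PySem.Dict.empty o]
  rw [PySem.Dict.getD_empty, PySem.List.foldl_append_singleton_eq_map]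
  rw [List.filter_filter]
  have hcomm : (fun a : Int × Int × Int × Int => a.2.2.1 == o && a.1 == s)
      = (fun p : Int × Int × Int × Int => p.1 == s && p.2.2.1 == o) := by
    funext a; exact Bool.and_comm _ _
  simp only [hcomm, List.nil_append]
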